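-- pv_equiv track=rewrite | github.com/jayrathod-techabbot/Applied-AI | gen-ai-course/04_agentic_systems/projects/01_devops_incident_responder/agent/nodes.py | _derive_severity
-- ===== SOURCE A (Python) =====
-- from typing import Any, Dict, List
--
-- def _derive_severity(anomalies: List[Dict[str, Any]]) -> str:
--     """
--     Derive overall incident severity from the list of detected anomalies.
--
--     Rules:
--     - Any 'critical' anomaly → severity = 'critical'
--     - 2+ 'high' anomalies → severity = 'critical'
--     - Any 'high' anomaly → severity = 'high'
--     - 2+ 'medium' anomalies → severity = 'high'
--     - Otherwise → severity = 'medium' or 'low'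
--     """
--     if not anomalies:
--         return "low"
--
--     severity_rank = {"low": 0, "medium": 1, "high": 2, "critical": 3}
--     counts = {"low": 0, "medium": 0, "high": 0, "critical": 0}
--     for a in anomalies:
--         sev = a.get("severity", "low")
--         counts[sev] = counts.get(sev, 0) + 1
--
--     if counts["critical"] >= 1:
--         return "critical"
--     if counts["high"] >= 2:
--         return "critical"
--     if counts["high"] >= 1:
--         return "high"
--     if counts["medium"] >= 2:
--         return "high"
--     if counts["medium"] >= 1:
--         return "medium"
--     return "low"
-- ===== SOURCE B (Python) =====
-- from typing import Any, Dict, List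
--
-- def _derive_severity(anomalies: List[Dict[str, Any]]) -> str:
--     # Lazy per-rule scans with early exit instead of building a counts table.
--     if any(a.get("severity", "low") == "critical" for a in anomalies):
--         return "critical"
--     highs = sum(1 for a in anomalies if a.get("severity", "low") == "high")
--     if highs >= 2:
--         return "critical"
--     if highs >= 1:
--         return "high"
--     mediums = sum(1 for a in anomalies if a.get("severity", "low") == "medium")
--     if mediums >= 2:
--         return "high"
--     if mediums >= 1:
--         return "medium"
--     return "low"
-- ===== Notes on version B (the rewrite author's own statement) =====
-- stated objective: idiomatic
-- what changed: Replaces the counts-dict building pass plus table lookups with direct per-rule scans: an any() early-exit for critical and two lazy sum() counts for high/medium, computed only when still undecided.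
import Mathlib
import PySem

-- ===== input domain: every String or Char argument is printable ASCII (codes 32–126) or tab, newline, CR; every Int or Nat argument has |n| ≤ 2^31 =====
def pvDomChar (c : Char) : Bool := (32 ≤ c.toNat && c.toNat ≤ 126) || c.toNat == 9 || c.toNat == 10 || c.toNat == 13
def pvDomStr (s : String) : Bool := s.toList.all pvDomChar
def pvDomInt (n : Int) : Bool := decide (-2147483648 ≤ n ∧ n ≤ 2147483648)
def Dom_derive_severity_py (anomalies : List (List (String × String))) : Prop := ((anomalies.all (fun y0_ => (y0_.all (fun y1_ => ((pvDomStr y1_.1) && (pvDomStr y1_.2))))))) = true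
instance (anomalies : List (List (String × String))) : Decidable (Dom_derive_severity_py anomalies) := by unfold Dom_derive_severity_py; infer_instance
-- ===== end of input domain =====

-- B answers each severity rule with its own lazy scan (any / conditional counts) instead of building a counts dict; same O(n), more idiomatic.


-- ===== PORT A =====
def derive_severity_py (anomalies : List (List (String × String))) : String :=
  if anomalies = [] then "low"
  else
    let counts0 : PySem.Dict String Int :=
      PySem.Dict.mk [("low", 0), ("medium", 0), ("high", 0), ("critical", 0)]
    let counts := anomalies.foldl (fun counts a =>
      let sev := (PySem.Dict.mk a).getD "severity" "low"
      counts.insert sev (counts.getD sev 0 + 1)) counts0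
    if counts.getD "critical" 0 ≥ 1 then "critical"
    else if counts.getD "high" 0 ≥ 2 then "critical"
    else if counts.getD "high" 0 ≥ 1 then "high"
    else if counts.getD "medium" 0 ≥ 2 then "high"
    else if counts.getD "medium" 0 ≥ 1 then "medium"
    else "low"

-- ===== PORT B =====
def derive_severity_py_alt (anomalies : List (List (String × String))) : String :=
  if anomalies.any (fun a => (PySem.Dict.mk a).getD "severity" "low" == "critical") then "critical"
  else
    let highs : Nat := anomalies.countP (fun a => (PySem.Dict.mk a).getD "severity" "low" == "high")
    if highs ≥ 2 then "critical"
    else if highs ≥ 1 then "high"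
    else
      let mediums : Nat := anomalies.countP (fun a => (PySem.Dict.mk a).getD "severity" "low" == "medium")
      if mediums ≥ 2 then "high"
      else if mediums ≥ 1 then "medium"
      else "low"

-- ===== PRECONDITION & SPEC =====
def Spec_derive_severity_py (anomalies : List (List (String × String))) (out : String) : Prop := out = derive_severity_py_alt anomalies
instance (anomalies : List (List (String × String))) (out : String) : Decidable (Spec_derive_severity_py anomalies out) := by unfold Spec_derive_severity_py; infer_instance

-- ===== CLAIM (what is proved, stated in full; the proofs are below) =====
def Claim_equal_derive_severity_py : Prop := ∀ (anomalies : List (List (String × String))), Dom_derive_severity_py anomalies → Spec_derive_severity_py anomalies (derive_severity_py anomalies)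

-- ===== LEMMAS AND PROOFS =====

-- A's counts dict, after the loop, holds at key k the initial value plus the number of anomalies whose severity is k.
theorem pv_counts_getD (anomalies : List (List (String × String))) (d : PySem.Dict String Int) (k : String) :
    (anomalies.foldl (fun counts a =>
        let sev := (PySem.Dict.mk a).getD "severity" "low"
        counts.insert sev (counts.getD sev 0 + 1)) d).getD k 0
    = d.getD k 0 + (anomalies.countP (fun a => (PySem.Dict.mk a).getD "severity" "low" == k) : Int) := by
  induction anomalies generalizing d with
  | nil => simp
  | cons a rest ih =>
    simp only [List.foldl_cons, List.countP_cons, ih]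
    rw [PySem.Dict.getD_insert]
    by_cases hk : k = (PySem.Dict.mk a).getD "severity" "low"
    · simp only [hk, beq_self_eq_true, if_pos]
      push_cast; ring
    · simp only [if_neg hk]
      have : ((PySem.Dict.mk a).getD "severity" "low" == k) = false := by
        simpa [beq_iff_eq] using fun h => hk h.symm
      simp [this]

-- any p = true ↔ countP p ≥ 1
theorem pv_any_iff_countP (l : List (List (String × String))) (p : List (String × String) → Bool) :
    l.any p = true ↔ 1 ≤ l.countP p := by
  rw [List.any_eq_true, ← List.countP_pos_iff]
  omega

-- ===== VERDICT (by name: the statement is the Claim_ definition above) =====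
theorem derive_severity_py_spec : Claim_equal_derive_severity_py := by
  intro anomalies _
  unfold Spec_derive_severity_py derive_severity_py derive_severity_py_alt
  by_cases hnil : anomalies = []
  · subst hnil; decide
  · simp only [if_neg hnil, pv_counts_getD]
    have hc := pv_any_iff_countP anomalies (fun a => (PySem.Dict.mk a).getD "severity" "low" == "critical")
    set c := anomalies.countP (fun a => (PySem.Dict.mk a).getD "severity" "low" == "critical") with hcdef
    set h := anomalies.countP (fun a => (PySem.Dict.mk a).getD "severity" "low" == "high") with hhdef
    set m := anomalies.countP (fun a => (PySem.Dict.mk a).getD "severity" "low" == "medium") with hmdef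
    have h0c : (PySem.Dict.mk [("low", (0:Int)), ("medium", 0), ("high", 0), ("critical", 0)]).getD "critical" 0 = 0 := by decide
    have h0h : (PySem.Dict.mk [("low", (0:Int)), ("medium", 0), ("high", 0), ("critical", 0)]).getD "high" 0 = 0 := by decide
    have h0m : (PySem.Dict.mk [("low", (0:Int)), ("medium", 0), ("high", 0), ("critical", 0)]).getD "medium" 0 = 0 := by decide
    rw [h0c, h0h, h0m]
    by_cases hany : anomalies.any (fun a => (PySem.Dict.mk a).getD "severity" "low" == "critical") = true
    · have h1c : 1 ≤ c := hc.mp hany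
      rw [if_pos (show (0:Int) + (c:Int) ≥ 1 by omega), if_pos hany]
    · have hc0 : c = 0 := by
        rcases Nat.eq_zero_or_pos c with h0 | h1
        · exact h0
        · exact absurd (hc.mpr h1) hany
      rw [if_neg (show ¬ ((0:Int) + (c:Int) ≥ 1) by omega), if_neg hany]
      by_cases h2 : h ≥ 2
      · rw [if_pos (show (0:Int) + (h:Int) ≥ 2 by omega), if_pos h2]
      · rw [if_neg (show ¬ ((0:Int) + (h:Int) ≥ 2) by omega), if_neg h2]
        by_cases h1 : h ≥ 1
        · rw [if_pos (show (0:Int) + (h:Int) ≥ 1 by omega), if_pos h1]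
        · rw [if_neg (show ¬ ((0:Int) + (h:Int) ≥ 1) by omega), if_neg h1]
          by_cases m2 : m ≥ 2
          · rw [if_pos (show (0:Int) + (m:Int) ≥ 2 by omega), if_pos m2]
          · rw [if_neg (show ¬ ((0:Int) + (m:Int) ≥ 2) by omega), if_neg m2]
            by_cases m1 : m ≥ 1
            · rw [if_pos (show (0:Int) + (m:Int) ≥ 1 by omega), if_pos m1]
            · rw [if_neg (show ¬ ((0:Int) + (m:Int) ≥ 1) by omega), if_neg m1]
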